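-- pv_equiv track=rewrite | github.com/Jimmy102836/api-checker | src/api_relay_audit/detectors/response_latency.py | _generate_filler
-- ===== SOURCE A (Python) =====
-- def _generate_filler(length: int) -> str:
--     """Generate pseudo-random filler text."""
--     words = [
--         "analysis", "context", "processing", "evaluation", "generation",
--         "synthesis", "retrieval", "transmission", "compression", "annotation",
--         "optimization", "calibration", "validation", "monitoring", "inference",
--     ]
--     result = []
--     while len(" ".join(result)) < length:
--         result.append(words[len(result) % len(words)])
--     return " ".join(result)[:length]
-- ===== SOURCE B (Python) =====
-- def _generate_filler(length: int) -> str: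
--     """Generate pseudo-random filler text."""
--     words = [
--         "analysis", "context", "processing", "evaluation", "generation",
--         "synthesis", "retrieval", "transmission", "compression", "annotation",
--         "optimization", "calibration", "validation", "monitoring", "inference",
--     ]
--     period = " ".join(words) + " "
--     n = length // len(period) + 1
--     return (period * n)[:length]
-- ===== Notes on version B (the rewrite author's own statement) =====
-- stated objective: faster
-- what changed: Replaces the append-one-word-and-rejoin-everything loop (quadratic in the output length) with a closed-form construction: build the one-cycle period ' '.join(words)+' ' once, repeat it just enough times and slice the repetition to the requested length.
import Mathlib
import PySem

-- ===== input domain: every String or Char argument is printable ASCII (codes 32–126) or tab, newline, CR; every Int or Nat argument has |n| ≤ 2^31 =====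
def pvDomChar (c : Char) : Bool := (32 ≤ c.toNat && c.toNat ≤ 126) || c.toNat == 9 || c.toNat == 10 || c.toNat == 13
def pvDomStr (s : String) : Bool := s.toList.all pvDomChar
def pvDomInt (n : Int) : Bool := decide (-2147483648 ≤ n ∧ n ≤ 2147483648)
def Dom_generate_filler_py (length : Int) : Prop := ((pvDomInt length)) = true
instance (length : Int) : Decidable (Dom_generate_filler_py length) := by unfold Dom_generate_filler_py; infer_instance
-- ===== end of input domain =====

-- B replaces A's append-a-word-and-rejoin loop by building the one-cycle period once,
-- repeating it just enough times and slicing to the requested length (objective: faster).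

-- ===== PORT A =====
-- the literal `words` list both Pythons carry
def pvWords : List String :=
  ["analysis", "context", "processing", "evaluation", "generation",
   "synthesis", "retrieval", "transmission", "compression", "annotation",
   "optimization", "calibration", "validation", "monitoring", "inference"]

-- join of a list with one element appended
theorem pvJoinSnoc (sep : List Char) (l : List (List Char)) (x : List Char) :
    PySem.Chars.join sep (l ++ [x]) =
      if l = [] then x else PySem.Chars.join sep l ++ sep ++ x := by
  induction l with
  | nil => simp [PySem.Chars.join_singleton]
  | cons a t ih =>
    cases t with
    | nil =>
      simp [PySem.Chars.join_singleton,
        PySem.Chars.join_cons_cons sep a x []]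
    | cons b u =>
      rw [show PySem.Chars.join sep ((a :: b :: u) ++ [x])
            = a ++ sep ++ PySem.Chars.join sep ((b :: u) ++ [x])
          from PySem.Chars.join_cons_cons sep a b (u ++ [x]), ih]
      simp [PySem.Chars.join_cons_cons]

-- appending the cyclic word strictly lengthens the join (termination of the loop)
theorem pvAppendWordLen (length : Int) (result : List String) :
    (length -
      PySem.Str.len (PySem.Str.join " "
        (result ++ [PySem.List.pyGetD pvWords
            (PySem.Int.mod (result.length : Int) (pvWords.length : Int)) ""]))).toNat <
    (length - PySem.Str.len (PySem.Str.join " " result)).toNat ∨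
    ¬ PySem.Str.len (PySem.Str.join " " result) < length := by
  by_cases h : PySem.Str.len (PySem.Str.join " " result) < length
  · left
    set w := PySem.List.pyGetD pvWords
        (PySem.Int.mod (result.length : Int) (pvWords.length : Int)) "" with hw
    have hidx : PySem.Int.mod (result.length : Int) (pvWords.length : Int)
        = ((result.length % 15 : Nat) : Int) := by
      simpa [pvWords] using PySem.Int.mod_natCast result.length 15
    have hmod : result.length % 15 < 15 := Nat.mod_lt _ (by norm_num)
    have hwlen : 7 ≤ w.toList.length := by
      rw [hw, hidx, PySem.List.pyGetD_natCast]
      interval_cases h15 : result.length % 15 <;> decide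
    have key : (PySem.Str.join " " result).toList.length + w.toList.length ≤
        (PySem.Str.join " " (result ++ [w])).toList.length := by
      rw [PySem.Str.toList_join, PySem.Str.toList_join, List.map_append, List.map_cons,
        List.map_nil, pvJoinSnoc]
      split_ifs with hnil
      · rw [hnil, PySem.Chars.join_nil]
        simp
      · simp only [List.length_append]
        omega
    rw [PySem.Str.len_eq, PySem.Str.len_eq] at *
    omega
  · right; exact h

def pvFillerLoop (length : Int) (result : List String) : List String :=
  if PySem.Str.len (PySem.Str.join " " result) < length then
    -- words[len(result) % len(words)]: the index is always in range, so pyGetD is exact here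
    pvFillerLoop length
      (result ++ [PySem.List.pyGetD pvWords
        (PySem.Int.mod (result.length : Int) (pvWords.length : Int)) ""])
  else result
termination_by (length - PySem.Str.len (PySem.Str.join " " result)).toNat
decreasing_by
  rcases pvAppendWordLen length result with h | h
  · exact h
  · exact absurd (by assumption) h

def generate_filler_py (length : Int) : String :=
  PySem.Str.slice (PySem.Str.join " " (pvFillerLoop length [])) none (some length)

-- ===== PORT B =====
-- Python `s * n` for a string, on char lists: empty for n ≤ 0 (exact)
def pvStrMulChars (cs : List Char) (n : Int) : List Char :=
  (List.replicate n.toNat cs).flatten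

def generate_filler_py_alt (length : Int) : String :=
  let period := (PySem.Str.join " " pvWords).toList ++ [' ']
  let n := PySem.Int.floordiv length (period.length : Int) + 1
  String.ofList (PySem.Chars.slice (pvStrMulChars period n) none (some length))

-- ===== PRECONDITION & SPEC =====
def Spec_generate_filler_py (length : Int) (out : String) : Prop := out = generate_filler_py_alt length
instance (length : Int) (out : String) : Decidable (Spec_generate_filler_py length out) := by unfold Spec_generate_filler_py; infer_instance

-- ===== CLAIM (what is proved, stated in full; the proofs are below) =====
def Claim_equal_generate_filler_py : Prop := ∀ (length : Int), Dom_generate_filler_py length → Spec_generate_filler_py length (generate_filler_py length)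

-- ===== LEMMAS AND PROOFS =====

-- the i-th word of the infinite cycle, as chars
def pvW (i : Nat) : List Char := (pvWords.getD (i % 15) "").toList
-- first k words of the cycle, each followed by one space
def pvJ (k : Nat) : List Char := ((List.range k).map (fun i => pvW i ++ [' '])).flatten
-- the list A's loop has built after k iterations, and its join as chars
def pvCyc (k : Nat) : List String := (List.range k).map (fun i => pvWords.getD (i % 15) "")
def pvJS (k : Nat) : List Char := (PySem.Str.join " " (pvCyc k)).toList

theorem pvJ_succ (k : Nat) : pvJ (k + 1) = pvJ k ++ (pvW k ++ [' ']) := by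
  simp [pvJ, List.range_succ]

theorem pvCyc_len (k : Nat) : (pvCyc k).length = k := by simp [pvCyc]

theorem pvJS_zero : pvJS 0 = [] := by
  simp [pvJS, pvCyc, PySem.Str.toList_join, PySem.Chars.join_nil]

theorem pvJS_succ (m : Nat) :
    pvJS (m + 1) = if m = 0 then pvW m else pvJS m ++ ([' '] ++ pvW m) := by
  have hcyc : pvCyc (m + 1) = pvCyc m ++ [pvWords.getD (m % 15) ""] := by
    simp [pvCyc, List.range_succ]
  have h1 : pvJS (m + 1)
      = PySem.Chars.join " ".toList ((pvCyc m).map String.toList ++ [pvW m]) := by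
    rw [pvJS, hcyc, PySem.Str.toList_join, List.map_append, List.map_cons, List.map_nil]
    rfl
  rw [h1, pvJoinSnoc]
  by_cases h0 : m = 0
  · subst h0
    simp [pvCyc]
  · rw [if_neg (by simp [pvCyc, h0]), if_neg h0]
    rw [pvJS, PySem.Str.toList_join]
    simp

theorem pvJS_pvJ (k : Nat) : pvJ k = pvJS k ++ (if k = 0 then [] else [' ']) := by
  induction k with
  | zero => simp [pvJ, pvJS_zero]
  | succ m ih =>
    rw [pvJ_succ, ih, pvJS_succ]
    by_cases h0 : m = 0
    · subst h0
      simp [pvJ, pvJS_zero]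
    · rw [if_neg h0, if_neg h0, if_neg (Nat.succ_ne_zero m)]
      simp

theorem pvJ_prefix {a b : Nat} (h : a ≤ b) : pvJ a <+: pvJ b := by
  induction b with
  | zero => simpa using (by omega : a = 0) ▸ List.prefix_refl _
  | succ n ih =>
    rcases Nat.lt_or_ge a (n + 1) with h' | h'
    · exact (ih (by omega)).trans (by rw [pvJ_succ]; exact List.prefix_append _ _)
    · have : a = n + 1 := by omega
      subst this; exact List.prefix_refl _

theorem pvW_shift (q x : Nat) : pvW (15 * q + x) = pvW x := by
  simp [pvW, Nat.mul_add_mod]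

theorem pvJ_add15 (q : Nat) : pvJ (15 * q + 15) = pvJ (15 * q) ++ pvJ 15 := by
  rw [pvJ, List.range_add, List.map_append, List.flatten_append, List.map_map]
  congr 1
  rw [pvJ]
  congr 1
  refine List.map_congr_left ?_
  intro x _
  simp [pvW_shift]

set_option maxRecDepth 8192 in
theorem pvJ15_len : (pvJ 15).length = 163 := by decide

theorem pvJ_mul15_len (n : Nat) : (pvJ (15 * n)).length = 163 * n := by
  induction n with
  | zero => simp [pvJ]
  | succ m ih =>
    have h : 15 * (m + 1) = 15 * m + 15 := by ring
    rw [h, pvJ_add15, List.length_append, ih, pvJ15_len]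
    ring

theorem pvRep_eq (n : Nat) : (List.replicate n (pvJ 15)).flatten = pvJ (15 * n) := by
  induction n with
  | zero => simp [pvJ]
  | succ m ih =>
    rw [List.replicate_succ', List.flatten_append, ih]
    have h : 15 * (m + 1) = 15 * m + 15 := by ring
    simp [h, pvJ_add15]

theorem pvCyc_snoc (k : Nat) :
    pvCyc k ++ [PySem.List.pyGetD pvWords
      (PySem.Int.mod (((pvCyc k).length : Nat) : Int) (pvWords.length : Int)) ""]
    = pvCyc (k + 1) := by
  have hidx : PySem.Int.mod ((k : Nat) : Int) (pvWords.length : Int)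
      = ((k % 15 : Nat) : Int) := by
    simpa [pvWords] using PySem.Int.mod_natCast k 15
  rw [pvCyc_len, hidx, PySem.List.pyGetD_natCast]
  simp [pvCyc, List.range_succ, List.getD]

-- loop characterisation: started on a cycle prefix, the loop ends at some pvCyc m whose join reaches length
theorem pvLoop_spec (length : Int) (result : List String) :
    (∃ k, result = pvCyc k) →
    ∃ m, pvFillerLoop length result = pvCyc m ∧ length ≤ ((pvJS m).length : Int) := by
  induction result using pvFillerLoop.induct (length := length) with
  | case1 x hcond ih =>
    rintro ⟨k, rfl⟩
    rw [pvFillerLoop, if_pos hcond]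
    exact ih ⟨k + 1, pvCyc_snoc k⟩
  | case2 x hcond =>
    rintro ⟨k, rfl⟩
    rw [pvFillerLoop, if_neg hcond]
    refine ⟨k, rfl, ?_⟩
    rw [PySem.Str.len_eq] at hcond
    have : (PySem.Str.join " " (pvCyc k)).toList = pvJS k := rfl
    rw [this] at hcond
    omega

theorem pvTakeEqOfPrefix {s t : List Char} (L : Nat) (h : s <+: t) (hl : L ≤ s.length) :
    s.take L = t.take L := by
  rcases h with ⟨r, rfl⟩
  exact (List.take_append_of_le_length hl).symm

set_option maxRecDepth 8192 in
theorem pvPeriod_eq : (PySem.Str.join " " pvWords).toList ++ [' '] = pvJ 15 := by decide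

-- both results are take L of arbitrarily long prefixes of the same infinite cyclic text
theorem pvTakeJ_eq {a b L : Nat} (ha : L ≤ (pvJ a).length) (hb : L ≤ (pvJ b).length) :
    (pvJ a).take L = (pvJ b).take L := by
  rcases Nat.le_total a b with h | h
  · exact pvTakeEqOfPrefix L (pvJ_prefix h) ha
  · exact (pvTakeEqOfPrefix L (pvJ_prefix h) hb).symm

-- ===== VERDICT (by name: the statement is the Claim_ definition above) =====
theorem generate_filler_py_spec : Claim_equal_generate_filler_py := by
  intro length _
  unfold Spec_generate_filler_py
  rw [← String.toList_inj]
  unfold generate_filler_py generate_filler_py_alt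
  rw [PySem.Str.toList_slice, String.toList_ofList, pvPeriod_eq, pvJ15_len]
  by_cases hpos : 0 < length
  · -- positive length
    obtain ⟨m, hm, hlen⟩ := pvLoop_spec length [] ⟨0, by simp [pvCyc]⟩
    rw [hm]
    have hJSm : (PySem.Str.join " " (pvCyc m)).toList = pvJS m := rfl
    rw [hJSm]
    have hL : length = ((length.toNat : Nat) : Int) := by omega
    set L := length.toNat with hLdef
    have hsla : PySem.Chars.slice (pvJS m) none (some length) = (pvJS m).take L := by
      rw [hL]
      simpa using PySem.List.slice_to_natCast (pvJS m) L
    have hdiv : PySem.Int.floordiv length ((163 : Nat) : Int) + 1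
        = ((L / 163 + 1 : Nat) : Int) := by
      rw [hL, PySem.Int.floordiv_natCast]
      push_cast
      ring
    have hslb : PySem.Chars.slice (pvStrMulChars (pvJ 15)
        (PySem.Int.floordiv length ((163 : Nat) : Int) + 1)) none (some length)
        = (pvJ (15 * (L / 163 + 1))).take L := by
      rw [hdiv]
      unfold pvStrMulChars
      rw [Int.toNat_natCast, pvRep_eq, hL]
      simpa using PySem.List.slice_to_natCast (pvJ (15 * (L / 163 + 1))) L
    rw [hsla, hslb]
    have hpref : pvJS m <+: pvJ m := ⟨_, (pvJS_pvJ m).symm⟩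
    have hLm : L ≤ (pvJS m).length := by omega
    rw [pvTakeEqOfPrefix L hpref hLm]
    have hlb : L ≤ (pvJ (15 * (L / 163 + 1))).length := by
      rw [pvJ_mul15_len]
      have := Nat.div_add_mod L 163
      have := Nat.mod_lt L (show 0 < 163 by norm_num)
      omega
    exact pvTakeJ_eq (le_trans hLm (List.IsPrefix.length_le hpref)) hlb
  · -- length ≤ 0: both sides are the empty string
    have hle : length ≤ 0 := by omega
    have hA : pvFillerLoop length [] = [] := by
      rw [pvFillerLoop, if_neg]
      rw [PySem.Str.len_eq, PySem.Str.toList_join]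
      simp [PySem.Chars.join_nil]
      omega
    rw [hA]
    have hAside : PySem.Chars.slice (PySem.Str.join " " ([] : List String)).toList
        none (some length) = [] := by
      rw [PySem.Str.toList_join]
      simp [PySem.Chars.join_nil, PySem.Chars.slice_eq_listSlice, PySem.List.slice]
    rcases eq_or_lt_of_le hle with h0 | hneg
    · -- length = 0: both are take 0
      rw [hAside, h0]
      have : PySem.Chars.slice (pvStrMulChars (pvJ 15)
          (PySem.Int.floordiv 0 ((163 : Nat) : Int) + 1)) none (some 0)
          = [] := by
        rw [show ((0 : Int)) = (((0 : Nat) : Nat) : Int) from rfl]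
        rw [PySem.Chars.slice_eq_listSlice]
        simpa using PySem.List.slice_to_natCast
          (pvStrMulChars (pvJ 15) (PySem.Int.floordiv 0 ((163 : Nat) : Int) + 1)) 0
      rw [this]
    · -- length < 0: B's repetition count is ≤ 0, so the repeated string is empty
      have hn : (PySem.Int.floordiv length ((163 : Nat) : Int) + 1).toNat = 0 := by
        have : PySem.Int.floordiv length ((163 : Nat) : Int) < 0 := by
          rw [PySem.Int.floordiv_lt_iff_lt_mul (by norm_num)]
          omega
        omega
      have hBside : PySem.Chars.slice (pvStrMulChars (pvJ 15)
          (PySem.Int.floordiv length ((163 : Nat) : Int) + 1)) none (some length) = [] := by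
        unfold pvStrMulChars
        rw [hn]
        simp [PySem.Chars.slice_eq_listSlice, PySem.List.slice]
      rw [hAside, hBside]
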